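-- pv_equiv track=rewrite | github.com/eliottcassidy2000/math | 04-computation/p13_spectral_analysis.py | count_ham_cycles_5
-- ===== SOURCE A (Python) =====
-- def count_ham_cycles_5(A, verts):
--     a, b, c, d, e = verts
--     total = 0
--     for perm in [(a,b,c,d,e), (a,b,c,e,d), (a,b,d,c,e), (a,b,d,e,c),
--                  (a,b,e,c,d), (a,b,e,d,c), (a,c,b,d,e), (a,c,b,e,d),
--                  (a,c,d,b,e), (a,c,d,e,b), (a,c,e,b,d), (a,c,e,d,b),
--                  (a,d,b,c,e), (a,d,b,e,c), (a,d,c,b,e), (a,d,c,e,b),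
--                  (a,d,e,b,c), (a,d,e,c,b), (a,e,b,c,d), (a,e,b,d,c),
--                  (a,e,c,b,d), (a,e,c,d,b), (a,e,d,b,c), (a,e,d,c,b)]:
--         ok = True
--         for i in range(5):
--             if not A[perm[i]][perm[(i+1)%5]]:
--                 ok = False
--                 break
--         if ok:
--             total += 1
--     return total
-- ===== SOURCE B (Python) =====
-- def count_ham_cycles_5(A, verts):
--     a, b, c, d, e = verts
--
--     def go(cur, rem):
--         # count Hamiltonian paths cur -> (all of rem) that close back to a
--         if not rem:
--             return 1 if A[cur][a] else 0
--         total = 0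
--         pre, post = [], rem
--         while post:
--             v, post = post[0], post[1:]
--             if A[cur][v]:
--                 total += go(v, pre + post)
--             pre = pre + [v]
--         return total
--
--     return go(a, [b, c, d, e])
-- ===== Notes on version B (the rewrite author's own statement) =====
-- stated objective: alternative
-- what changed: Replaced the hard-coded list of 24 permutations checked against a modular edge loop by recursive backtracking that fixes the start vertex and extends a path only along truthy edges, closing the cycle at depth 4.
-- outside the precondition, e.g. on count_ham_cycles_5([[0, 0], [0]], [0, 1, 1, 1, 1]): A returns 0, B returns 0
import Mathlib
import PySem

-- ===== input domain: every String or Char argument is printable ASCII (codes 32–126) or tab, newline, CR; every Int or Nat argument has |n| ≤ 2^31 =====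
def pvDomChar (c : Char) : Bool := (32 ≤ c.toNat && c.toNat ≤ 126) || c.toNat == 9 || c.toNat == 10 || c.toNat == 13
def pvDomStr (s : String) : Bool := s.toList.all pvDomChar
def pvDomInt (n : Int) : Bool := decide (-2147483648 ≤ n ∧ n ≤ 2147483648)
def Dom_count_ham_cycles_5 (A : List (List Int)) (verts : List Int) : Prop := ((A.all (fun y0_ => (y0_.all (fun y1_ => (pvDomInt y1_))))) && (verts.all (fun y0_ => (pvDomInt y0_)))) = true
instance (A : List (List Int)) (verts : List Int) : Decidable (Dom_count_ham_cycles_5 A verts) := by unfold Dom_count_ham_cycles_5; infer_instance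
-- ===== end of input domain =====

-- B replaces A's hard-coded list of the 24 permutations by recursive backtracking that extends a
-- path from the fixed start vertex along truthy edges only (objective: alternative decomposition).

-- ===== PORT A =====
-- A[u][v] with Python's negative-index rule; the .getD 0 default is never reached on Pre_ inputs
-- (Python raises IndexError there, and Pre_ excludes those inputs).
def pvEdgeA (A : List (List Int)) (u v : Int) : Int :=
  ((PySem.List.pyGet? A u).bind (fun r => PySem.List.pyGet? r v)).getD 0

-- the inner 'for i in range(5): if not A[perm[i]][perm[(i+1)%5]]: ok = False; break' loop,
-- written out for the five wrapped index pairs; && short-circuits exactly like the break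
def pvPermOk (A : List (List Int)) (p : Int × Int × Int × Int × Int) : Bool :=
  match p with
  | (p0, p1, p2, p3, p4) =>
    decide (pvEdgeA A p0 p1 ≠ 0) && decide (pvEdgeA A p1 p2 ≠ 0) &&
    decide (pvEdgeA A p2 p3 ≠ 0) && decide (pvEdgeA A p3 p4 ≠ 0) &&
    decide (pvEdgeA A p4 p0 ≠ 0)

def count_ham_cycles_5 (A : List (List Int)) (verts : List Int) : Int :=
  match verts with
  | [a, b, c, d, e] =>
    ([(a,b,c,d,e), (a,b,c,e,d), (a,b,d,c,e), (a,b,d,e,c),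
      (a,b,e,c,d), (a,b,e,d,c), (a,c,b,d,e), (a,c,b,e,d),
      (a,c,d,b,e), (a,c,d,e,b), (a,c,e,b,d), (a,c,e,d,b),
      (a,d,b,c,e), (a,d,b,e,c), (a,d,c,b,e), (a,d,c,e,b),
      (a,d,e,b,c), (a,d,e,c,b), (a,e,b,c,d), (a,e,b,d,c),
      (a,e,c,b,d), (a,e,c,d,b), (a,e,d,b,c), (a,e,d,c,b)] :
      List (Int × Int × Int × Int × Int)).foldl
      (fun total perm => if pvPermOk A perm then total + 1 else total) 0
  | _ => 0  -- unreachable under Pre_ (Python raises ValueError unpacking verts)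

-- ===== PORT B =====
def pvEdgeB (A : List (List Int)) (u v : Int) : Int :=
  ((PySem.List.pyGet? A u).bind (fun r => PySem.List.pyGet? r v)).getD 0

-- go(cur, rem) of Source B; the while loop over (pre, post) is pvGoLoop, with pre ++ post the
-- not-yet-chosen vertices rem
mutual
def pvGo (A : List (List Int)) (a cur : Int) (rem : List Int) : Int :=
  match rem with
  | [] => if pvEdgeB A cur a ≠ 0 then 1 else 0
  | v :: rest => pvGoLoop A a cur 0 [] (v :: rest)
termination_by (rem.length, rem.length + 1)

def pvGoLoop (A : List (List Int)) (a cur : Int) (total : Int) (pre post : List Int) : Int :=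
  match post with
  | [] => total
  | v :: rest =>
    pvGoLoop A a cur
      (if pvEdgeB A cur v ≠ 0 then total + pvGo A a v (pre ++ rest) else total)
      (pre ++ [v]) rest
termination_by (pre.length + post.length, post.length)
decreasing_by
  · simp; omega
  · simp; omega
end

-- the 'a, b, c, d, e = verts' unpacking (length must be exactly 5, else unreachable under Pre_)
def count_ham_cycles_5_alt (A : List (List Int)) (verts : List Int) : Int :=
  if verts.length = 5 then
    pvGo A (verts.getD 0 0) (verts.getD 0 0)
      [verts.getD 1 0, verts.getD 2 0, verts.getD 3 0, verts.getD 4 0]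
  else 0

-- ===== PRECONDITION & SPEC =====
-- Pre_ excludes inputs where verts does not unpack into exactly 5 values (Python raises
-- ValueError) or where some pair of verts indexes out of range in A (Python raises IndexError,
-- except in corner cases where the short-circuiting break stops every permutation before the
-- bad lookup and A still returns).
def Pre_count_ham_cycles_5 (A : List (List Int)) (verts : List Int) : Prop :=
  verts.length = 5 ∧
  ∀ v ∈ verts, ∀ w ∈ verts,
    ((PySem.List.pyGet? A v).bind (fun r => PySem.List.pyGet? r w)) ≠ none

instance (A : List (List Int)) (verts : List Int) : Decidable (Pre_count_ham_cycles_5 A verts) := by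
  unfold Pre_count_ham_cycles_5; infer_instance

def pvWitness_count_ham_cycles_5 : List (List Int) × List Int :=
  ([[1, 1], [1, 1]], [0, 1, 0, 1, 0])

def Spec_count_ham_cycles_5 (A : List (List Int)) (verts : List Int) (out : Int) : Prop := out = count_ham_cycles_5_alt A verts
instance (A : List (List Int)) (verts : List Int) (out : Int) : Decidable (Spec_count_ham_cycles_5 A verts out) := by unfold Spec_count_ham_cycles_5; infer_instance

-- ===== CLAIM (what is proved, stated in full; the proofs are below) =====
def Claim_equal_count_ham_cycles_5 : Prop := ∀ (A : List (List Int)) (verts : List Int), Dom_count_ham_cycles_5 A verts → Pre_count_ham_cycles_5 A verts → Spec_count_ham_cycles_5 A verts (count_ham_cycles_5 A verts)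

-- ===== LEMMAS AND PROOFS =====

theorem pvEdge_eq : pvEdgeA = pvEdgeB := rfl

theorem pv_if_push (c : Prop) [Decidable c] (x y : Int) :
    (if c then x + y else x) = x + (if c then y else 0) := by
  split <;> simp

theorem pv_if_distrib_add (c : Prop) [Decidable c] (x y : Int) :
    (if c then x + y else 0) = (if c then x else 0) + (if c then y else 0) := by
  split <;> simp

theorem count_ham_cycles_5_eq (A : List (List Int)) (a b c d e : Int) :
    count_ham_cycles_5 A [a, b, c, d, e] = count_ham_cycles_5_alt A [a, b, c, d, e] := by
  have halt : count_ham_cycles_5_alt A [a, b, c, d, e] = pvGo A a a [b, c, d, e] := by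
    simp [count_ham_cycles_5_alt]
  rw [halt]
  simp only [count_ham_cycles_5, pvPermOk, pvEdge_eq,
    pvGo, pvGoLoop, List.foldl_cons, List.foldl_nil,
    List.nil_append, List.append_nil, List.cons_append,
    Bool.and_eq_true, decide_eq_true_eq, ite_and,
    pv_if_push, pv_if_distrib_add, zero_add]
  ring

-- ===== VERDICT (by name: the statement is the Claim_ definition above) =====
theorem count_ham_cycles_5_spec : Claim_equal_count_ham_cycles_5 := by
  intro A verts _hdom hpre
  unfold Spec_count_ham_cycles_5
  obtain ⟨hlen, -⟩ := hpre
  match verts, hlen with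
  | [a, b, c, d, e], _ => exact count_ham_cycles_5_eq A a b c d e
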